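-- pv_equiv track=rewrite | github.com/NJNAN/kafka-flink-video-streaming-asr | subtitle-agent/agent/consistency_agent.py | compact_items
-- ===== SOURCE A (Python) =====
-- def compact_items(items: list[dict], max_chars: int = 22000) -> str:
--     parts: list[str] = []
--     used = 0
--     for index, item in enumerate(items, start=1):
--         line = f"{index}. {item.get('text', '')}\n"
--         if used + len(line) > max_chars:
--             break
--         parts.append(line)
--         used += len(line)
--     return "".join(parts)
-- ===== SOURCE B (Python) =====
-- def compact_items(items: list, max_chars: int = 22000) -> str:
--     # Phase 1: format every line up front.
--     lines = [f"{i}. {item.get('text', '')}\n" for i, item in enumerate(items, start=1)]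
--     # Phase 2: cumulative character counts.
--     totals = []
--     t = 0
--     for line in lines:
--         t += len(line)
--         totals.append(t)
--     # Phase 3: cutoff = index of first cumulative total exceeding max_chars.
--     cutoff = len(lines)
--     for j, total in enumerate(totals):
--         if total > max_chars:
--             cutoff = j
--             break
--     return "".join(lines[:cutoff])
-- ===== Notes on version B (the rewrite author's own statement) =====
-- stated objective: alternative
-- what changed: Replaces A's single greedy accumulate-and-break loop with a three-phase pipeline: format all lines, build an explicit prefix-sum table of their lengths, find the first cumulative total exceeding max_chars, and join that prefix slice.
import Mathlib
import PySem

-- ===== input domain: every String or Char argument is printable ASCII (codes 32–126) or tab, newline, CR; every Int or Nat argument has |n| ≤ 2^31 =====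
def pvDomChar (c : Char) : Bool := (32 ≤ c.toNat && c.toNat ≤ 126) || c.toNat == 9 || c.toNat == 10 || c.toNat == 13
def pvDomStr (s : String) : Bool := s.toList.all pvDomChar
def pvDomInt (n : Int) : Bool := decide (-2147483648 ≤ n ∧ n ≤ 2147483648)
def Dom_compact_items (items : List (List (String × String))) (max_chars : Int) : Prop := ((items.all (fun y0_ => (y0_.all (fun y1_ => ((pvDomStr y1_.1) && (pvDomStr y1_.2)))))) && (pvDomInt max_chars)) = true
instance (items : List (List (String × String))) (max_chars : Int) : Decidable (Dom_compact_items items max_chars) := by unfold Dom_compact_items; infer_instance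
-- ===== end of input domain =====

-- B replaces A's greedy accumulate-and-break loop with a format-all / prefix-sum / cutoff-slice pipeline (alternative decomposition, same cost).

-- ===== PORT A =====
-- line = f"{index}. {item.get('text', '')}\n"
def compactLine (index : Int) (item : List (String × String)) : String :=
  PySem.Int.toStr index ++ ". " ++ PySem.Dict.getD (PySem.Dict.mk item) "text" "" ++ "\n"

-- the for-loop of A: state (parts, used), break drops out of the recursion
def compactGoA (max_chars : Int) : List (List (String × String)) → Int → List String → Int → List String
  | [], _, parts, _ => parts
  | item :: rest, index, parts, used =>
    let line := compactLine index item
    if used + (PySem.Str.len line : Int) > max_chars then parts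
    else compactGoA max_chars rest (index + 1) (parts ++ [line]) (used + (PySem.Str.len line : Int))

def compact_items (items : List (List (String × String))) (max_chars : Int) : String :=
  PySem.Str.join "" (compactGoA max_chars items 1 [] 0)

-- ===== PORT B =====
-- Phase 2 of B: running totals of line lengths
def compactTotals : List String → Int → List Int
  | [], _ => []
  | l :: rest, t => (t + (PySem.Str.len l : Int)) :: compactTotals rest (t + (PySem.Str.len l : Int))

-- Phase 3 of B: index of the first total exceeding max_chars (default: the initial cutoff)
def compactCutoff (max_chars : Int) : List Int → Nat → Nat → Nat
  | [], _, cutoff => cutoff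
  | t :: rest, j, cutoff => if t > max_chars then j else compactCutoff max_chars rest (j + 1) cutoff

def compact_items_alt (items : List (List (String × String))) (max_chars : Int) : String :=
  let lines := (PySem.List.enumerate items 1).map (fun p => compactLine p.1 p.2)
  let totals := compactTotals lines 0
  let cutoff := compactCutoff max_chars totals 0 lines.length
  PySem.Str.join "" (lines.take cutoff)

-- ===== PRECONDITION & SPEC =====
def Spec_compact_items (items : List (List (String × String))) (max_chars : Int) (out : String) : Prop := out = compact_items_alt items max_chars
instance (items : List (List (String × String))) (max_chars : Int) (out : String) : Decidable (Spec_compact_items items max_chars out) := by unfold Spec_compact_items; infer_instance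

-- ===== CLAIM (what is proved, stated in full; the proofs are below) =====
def Claim_equal_compact_items : Prop := ∀ (items : List (List (String × String))) (max_chars : Int), Dom_compact_items items max_chars → Spec_compact_items items max_chars (compact_items items max_chars)

-- ===== LEMMAS AND PROOFS =====

-- common reference: the greedy prefix of a list of lines
def compactGreedy (max_chars : Int) : List String → Int → List String
  | [], _ => []
  | l :: rest, used =>
    if used + (PySem.Str.len l : Int) > max_chars then []
    else l :: compactGreedy max_chars rest (used + (PySem.Str.len l : Int))

-- the lines A generates from position index onward
def compactLines : List (List (String × String)) → Int → List String
  | [], _ => []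
  | item :: rest, index => compactLine index item :: compactLines rest (index + 1)

theorem compactGoA_eq_greedy (max_chars : Int) (items : List (List (String × String))) :
    ∀ (index : Int) (parts : List String) (used : Int),
    compactGoA max_chars items index parts used
      = parts ++ compactGreedy max_chars (compactLines items index) used := by
  induction items with
  | nil => intro index parts used; simp [compactGoA, compactLines, compactGreedy]
  | cons item rest ih =>
    intro index parts used
    simp only [compactGoA, compactLines, compactGreedy]
    split
    · simp
    · rw [ih]; simp

theorem enumerate_map_eq_compactLines (items : List (List (String × String))) :
    ∀ (s : Int),
    (PySem.List.enumerate items s).map (fun p => compactLine p.1 p.2) = compactLines items s := by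
  induction items with
  | nil => intro s; simp [PySem.List.enumerate_nil, compactLines]
  | cons item rest ih =>
    intro s
    rw [PySem.List.enumerate_cons]
    simp [compactLines, ih]

theorem compactCutoff_shift (max_chars : Int) (ts : List Int) :
    ∀ (j c : Nat), compactCutoff max_chars ts (j + 1) (c + 1) = compactCutoff max_chars ts j c + 1 := by
  induction ts with
  | nil => intro j c; simp [compactCutoff]
  | cons t rest ih =>
    intro j c
    simp only [compactCutoff]
    split
    · rfl
    · exact ih (j + 1) c

theorem take_cutoff_eq_greedy (max_chars : Int) (ls : List String) :
    ∀ (used : Int),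
    ls.take (compactCutoff max_chars (compactTotals ls used) 0 ls.length)
      = compactGreedy max_chars ls used := by
  induction ls with
  | nil => intro used; simp [compactTotals, compactCutoff, compactGreedy]
  | cons l rest ih =>
    intro used
    simp only [compactTotals, compactCutoff, compactGreedy, List.length_cons]
    split
    · simp
    · rw [compactCutoff_shift, List.take_succ_cons, ih]

-- ===== VERDICT (by name: the statement is the Claim_ definition above) =====
theorem compact_items_spec : Claim_equal_compact_items := by
  intro items max_chars _
  unfold Spec_compact_items compact_items compact_items_alt
  simp only []
  rw [compactGoA_eq_greedy, enumerate_map_eq_compactLines, ← take_cutoff_eq_greedy]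
  simp
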